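-- pv_equiv track=rewrite | github.com/imakshat47/AQF | result_formatter.py | build_unique_headers
-- ===== SOURCE A (Python) =====
-- from typing import Dict, List, Any
--
-- def build_short_header(label: str) -> str:
--     """
--     Convert long semantic labels into shorter table headers.
--     Example:
--       'HCPA → General data → State' -> 'State'
--     """
--     if not label:
--         return "Field"
--     parts = [p.strip() for p in label.split("→")]   #   'HCPA → chemotherapy → duration of treatment' -> 'Duration of treatment'
--
--     if not parts:
--         return label
--
--     short = parts[-1]
--     if short:
--         short = short[0].upper() + short[1:]
--
--     return short
--
-- def build_unique_headers(output_fields: List[Dict[str, Any]]) -> Dict[str, str]: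
--     """
--     Create human-readable unique headers for result columns.
--
--     Expected output_fields format:
--     [
--       {
--         "field_key": "...",
--         "name": "HCPA → General data → State",
--         "dv_type": "DV_CODED_TEXT"
--       },
--       ...
--     ]
--     """
--     short_headers = {}
--     counts = {}
--
--     for f in output_fields:
--         label = f.get("name", "")
--         short = build_short_header(label)
--
--         counts[short] = counts.get(short, 0) + 1
--         short_headers[f["field_key"]] = short
--
--     final_headers = {}
--     for f in output_fields:
--         label = f.get("name", "")
--         short = build_short_header(label)
--
--         if counts[short] > 1:
--             # If duplicate short headers exist, expand with fuller semantic path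
--             full = label.replace(" → ", " / ")
--             final_headers[f["field_key"]] = full
--         else:
--             final_headers[f["field_key"]] = short
--
--     return final_headers
-- ===== SOURCE B (Python) =====
-- from typing import Dict, List, Any
--
-- def build_short_header(label: str) -> str:
--     if not label:
--         return "Field"
--     parts = [p.strip() for p in label.split("\u2192")]
--     if not parts:
--         return label
--     short = parts[-1]
--     if short:
--         short = short[0].upper() + short[1:]
--     return short
--
-- def build_unique_headers(output_fields: List[Dict[str, Any]]) -> Dict[str, str]:
--     # Single pass, no counting structures: a field's short header is ambiguous
--     # exactly when some OTHER field yields the same short header, so each field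
--     # decides locally by scanning the rest of the list for a clash.
--     headers = {}
--     for i, f in enumerate(output_fields):
--         label = f.get("name", "")
--         short = build_short_header(label)
--         if any(j != i and build_short_header(g.get("name", "")) == short
--                for j, g in enumerate(output_fields)):
--             headers[f["field_key"]] = label.replace(" \u2192 ", " / ")
--         else:
--             headers[f["field_key"]] = short
--     return headers
-- ===== Notes on version B (the rewrite author's own statement) =====
-- stated objective: alternative
-- what changed: B drops A's counting dict and two-phase count-then-reassign shape entirely: in a single pass each field decides its header locally by scanning the other fields (any j != i with the same short header) to detect a clash, a quadratic existence scan instead of A's linear tallying.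
import Mathlib
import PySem

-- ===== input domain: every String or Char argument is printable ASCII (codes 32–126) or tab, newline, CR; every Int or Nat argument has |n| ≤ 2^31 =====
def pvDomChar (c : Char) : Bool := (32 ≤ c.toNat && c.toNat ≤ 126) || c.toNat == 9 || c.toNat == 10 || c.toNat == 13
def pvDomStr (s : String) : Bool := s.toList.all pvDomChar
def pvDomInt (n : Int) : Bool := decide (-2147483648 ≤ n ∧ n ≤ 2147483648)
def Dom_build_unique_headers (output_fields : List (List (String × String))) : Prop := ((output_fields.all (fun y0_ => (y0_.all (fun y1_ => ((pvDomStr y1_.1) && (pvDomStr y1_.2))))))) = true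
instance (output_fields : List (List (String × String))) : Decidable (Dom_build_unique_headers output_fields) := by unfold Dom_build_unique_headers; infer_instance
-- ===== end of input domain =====

-- B replaces A's counting dict and two-phase count-then-reassign by a single pass in
-- which each field detects a clash by scanning the OTHER fields (any j != i with the
-- same short header); objective: alternative. No argument is mutated.
-- ===== PORT A =====
-- build_short_header is shared verbatim by Source A and Source B.
-- 'if not parts' in Python is dead (split never returns []), ported literally anyway;
-- pyGetD defaults are only reached where the guarded Python cannot reach them.
def build_short_header (label : String) : String :=
  if label = "" then "Field"
  else
    -- parts = [p.strip() for p in label.split("\u2192")]  (sep nonempty, so split? = some)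
    let parts := ((PySem.Str.split? label "\u2192").getD []).map PySem.Str.strip
    if parts = [] then label
    else
      let short := PySem.List.pyGetD parts (-1) ""
      if short = "" then short
      else  -- short[0].upper() + short[1:]
        String.ofList (PySem.Chars.upper [PySem.List.pyGetD short.toList 0 ' '] ++
                       PySem.Chars.slice short.toList (some 1) none)

-- f["field_key"] raises KeyError when the key is absent: those inputs are excluded by
-- Pre_build_unique_headers, so the getD default "" is never reached there; counts[short]
-- in the second loop is always present, ported as getD 0.
def build_unique_headers (output_fields : List (List (String × String))) : List (String × String) :=
  let p := output_fields.foldl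
    (fun (st : PySem.Dict String String × PySem.Dict String Int) f =>
      let label := (PySem.Dict.mk f).getD "name" ""
      let short := build_short_header label
      (st.1.insert ((PySem.Dict.mk f).getD "field_key" "") short,
       st.2.insert short (st.2.getD short 0 + 1)))
    (PySem.Dict.empty, PySem.Dict.empty)
  (output_fields.foldl
    (fun (d : PySem.Dict String String) f =>
      let label := (PySem.Dict.mk f).getD "name" ""
      let short := build_short_header label
      if p.2.getD short 0 > 1 then
        d.insert ((PySem.Dict.mk f).getD "field_key" "") (PySem.Str.replace label " \u2192 " " / ")
      else
        d.insert ((PySem.Dict.mk f).getD "field_key" "") short)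
    PySem.Dict.empty).items

-- ===== PORT B =====
-- One pass over enumerate(output_fields); the 'any(j != i and ...)' generator becomes
-- List.any over the same enumeration.
def build_unique_headers_alt (output_fields : List (List (String × String))) : List (String × String) :=
  ((PySem.List.enumerate output_fields).foldl
    (fun (d : PySem.Dict String String) p =>
      let label := (PySem.Dict.mk p.2).getD "name" ""
      let short := build_short_header label
      if (PySem.List.enumerate output_fields).any
           (fun q => q.1 != p.1 && (build_short_header ((PySem.Dict.mk q.2).getD "name" "") == short)) then
        d.insert ((PySem.Dict.mk p.2).getD "field_key" "") (PySem.Str.replace label " \u2192 " " / ")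
      else
        d.insert ((PySem.Dict.mk p.2).getD "field_key" "") short)
    PySem.Dict.empty).items

-- ===== PRECONDITION & SPEC =====
-- Pre_ excludes exactly the inputs where the Python raises KeyError: a field dict
-- without a "field_key" entry (both A and B raise there, at f["field_key"]).
def Pre_build_unique_headers (output_fields : List (List (String × String))) : Prop :=
  ∀ f ∈ output_fields, (PySem.Dict.mk f).contains "field_key" = true
instance (output_fields : List (List (String × String))) : Decidable (Pre_build_unique_headers output_fields) := by unfold Pre_build_unique_headers; infer_instance
def pvWitness_build_unique_headers : (List (List (String × String))) :=
  [[("field_key", "a"), ("name", "State")], [("field_key", "b"), ("name", "State")]]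
def Spec_build_unique_headers (output_fields : List (List (String × String))) (out : List (String × String)) : Prop := out = build_unique_headers_alt output_fields
instance (output_fields : List (List (String × String))) (out : List (String × String)) : Decidable (Spec_build_unique_headers output_fields out) := by unfold Spec_build_unique_headers; infer_instance

-- ===== CLAIM (what is proved, stated in full; the proofs are below) =====
def Claim_equal_build_unique_headers : Prop := ∀ (output_fields : List (List (String × String))), Dom_build_unique_headers output_fields → Pre_build_unique_headers output_fields → Spec_build_unique_headers output_fields (build_unique_headers output_fields)

-- ===== LEMMAS AND PROOFS =====

-- counts.getD s 0 = how many fields map to short header s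
lemma counts_getD_eq {α : Type} (S : α → String) (l : List α) (s : String) :
    (l.foldl (fun d f => d.insert (S f) (d.getD (S f) 0 + 1)) PySem.Dict.empty).getD s 0
      = ((l.map S).count s : Int) := by
  rw [← List.foldl_map (f := S) (g := fun (d : PySem.Dict String Int) x => d.insert x (d.getD x 0 + 1)),
      PySem.Dict.getD_foldl_insert_add_one]
  simp

-- countP exceeds 1 iff some OTHER index also satisfies the predicate
lemma countP_gt_one_iff {α : Type} (p : α → Bool) :
    ∀ (l : List α) (k : Nat) (hk : k < l.length), p (l[k]'hk) = true →
      (1 < l.countP p ↔ ∃ j, ∃ h : j < l.length, j ≠ k ∧ p (l[j]'h) = true)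
  | [], k, hk, _ => absurd hk (Nat.not_lt_zero k)
  | x :: t, 0, _, hp => by
      simp only [List.getElem_cons_zero] at hp
      simp only [List.countP_cons, hp, if_pos]
      constructor
      · intro h
        have h0 : 0 < t.countP p := by omega
        obtain ⟨y, hy, hpy⟩ := List.countP_pos_iff.mp h0
        obtain ⟨j, hj, hje⟩ := List.getElem_of_mem hy
        exact ⟨j + 1, by simpa using hj, by omega, by simpa [hje] using hpy⟩
      · rintro ⟨j, h, hne, hpj⟩
        match j, h, hpj with
        | 0, _, _ => omega
        | j + 1, h, hpj =>
          have h0 : 0 < t.countP p :=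
            List.countP_pos_iff.mpr ⟨t[j]'(by simpa using h), List.getElem_mem _, by simpa using hpj⟩
          omega
  | x :: t, k + 1, hk, hp => by
      simp only [List.getElem_cons_succ] at hp
      have hk' : k < t.length := by simpa using hk
      by_cases hx : p x = true
      · simp only [List.countP_cons, hx, if_pos]
        have h0 : 0 < t.countP p :=
          List.countP_pos_iff.mpr ⟨t[k], List.getElem_mem _, hp⟩
        constructor
        · intro _; exact ⟨0, by simp, by omega, by simpa using hx⟩
        · intro _; omega
      · simp only [List.countP_cons, hx, if_neg, Bool.false_eq_true, not_false_iff, Nat.add_zero]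
        rw [countP_gt_one_iff p t k hk' hp]
        constructor
        · rintro ⟨j, h, hne, hpj⟩
          exact ⟨j + 1, by simpa using h, by omega, by simpa using hpj⟩
        · rintro ⟨j, h, hne, hpj⟩
          match j, h, hpj with
          | 0, _, hpj => exact absurd (by simpa using hpj) hx
          | j + 1, h, hpj => exact ⟨j, by simpa using h, by omega, by simpa using hpj⟩

-- per-element: A's count test coincides with B's scan over the other indices
lemma cond_iff {α : Type} (S : α → String) (l : List α) (k : Nat) (hk : k < l.length) :
    (1 < ((l.map S).count (S (l[k]'hk)) : Int))
      ↔ ((PySem.List.enumerate l).any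
          (fun q => q.1 != (0 + (k : Int)) && (S q.2 == S (l[k]'hk))) = true) := by
  have hcnt : (l.map S).count (S (l[k]'hk)) = l.countP (fun x => S x == S (l[k]'hk)) := by
    rw [List.count_eq_countP, List.countP_map]; rfl
  have hself : (fun x => S x == S (l[k]'hk)) (l[k]'hk) = true := by simp
  have hiff := countP_gt_one_iff (fun x => S x == S (l[k]'hk)) l k hk hself
  constructor
  · intro hlt
    have h1 : 1 < l.countP (fun x => S x == S (l[k]'hk)) := by
      rw [hcnt] at hlt; exact_mod_cast hlt
    obtain ⟨j, h, hne, hpj⟩ := hiff.mp h1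
    refine List.any_eq_true.mpr ⟨((0 : Int) + (j : Int), l[j]'h),
      (PySem.List.mem_enumerate_iff l 0 _).mpr ⟨j, h, rfl⟩, ?_⟩
    simp only [Bool.and_eq_true, bne_iff_ne, ne_eq, beq_iff_eq]
    exact ⟨by omega, by simpa using hpj⟩
  · intro hb
    obtain ⟨q, hqmem, hq⟩ := List.any_eq_true.mp hb
    obtain ⟨j, h, rfl⟩ := (PySem.List.mem_enumerate_iff l 0 q).mp hqmem
    simp only [Bool.and_eq_true, bne_iff_ne, ne_eq, beq_iff_eq] at hq
    have hne : j ≠ k := by intro hc; exact hq.1 (by omega)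
    have h1 : 1 < l.countP (fun x => S x == S (l[k]'hk)) :=
      hiff.mpr ⟨j, h, hne, by simp [hq.2]⟩
    rw [hcnt]; exact_mod_cast h1

-- generic form of the whole equivalence, abstracting the per-field string functions
lemma main_generic {α : Type} (S K R : α → String) (l : List α) :
    (l.foldl (fun (d : PySem.Dict String String) f =>
        if ((l.foldl (fun (d : PySem.Dict String Int) f => d.insert (S f) (d.getD (S f) 0 + 1)) PySem.Dict.empty).getD (S f) 0) > 1
        then d.insert (K f) (R f) else d.insert (K f) (S f)) PySem.Dict.empty)
    = ((PySem.List.enumerate l).foldl (fun (d : PySem.Dict String String) p =>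
        if (PySem.List.enumerate l).any (fun q => q.1 != p.1 && (S q.2 == S p.2))
        then d.insert (K p.2) (R p.2) else d.insert (K p.2) (S p.2)) PySem.Dict.empty) := by
  have hstep : ∀ (d : PySem.Dict String String) (p : Int × α), p ∈ PySem.List.enumerate l →
      (if ((l.foldl (fun (d : PySem.Dict String Int) f => d.insert (S f) (d.getD (S f) 0 + 1)) PySem.Dict.empty).getD (S p.2) 0) > 1
       then d.insert (K p.2) (R p.2) else d.insert (K p.2) (S p.2))
      = (if (PySem.List.enumerate l).any (fun q => q.1 != p.1 && (S q.2 == S p.2))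
         then d.insert (K p.2) (R p.2) else d.insert (K p.2) (S p.2)) := by
    intro d p hp
    obtain ⟨k, hk, rfl⟩ := (PySem.List.mem_enumerate_iff l 0 p).mp hp
    rw [counts_getD_eq S l (S (l[k]'hk))]
    exact if_congr (cond_iff S l k hk) rfl rfl
  calc (l.foldl (fun (d : PySem.Dict String String) f =>
        if ((l.foldl (fun (d : PySem.Dict String Int) f => d.insert (S f) (d.getD (S f) 0 + 1)) PySem.Dict.empty).getD (S f) 0) > 1
        then d.insert (K f) (R f) else d.insert (K f) (S f)) PySem.Dict.empty)
      = ((PySem.List.enumerate l).map (·.2)).foldl (fun (d : PySem.Dict String String) f =>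
        if ((l.foldl (fun (d : PySem.Dict String Int) f => d.insert (S f) (d.getD (S f) 0 + 1)) PySem.Dict.empty).getD (S f) 0) > 1
        then d.insert (K f) (R f) else d.insert (K f) (S f)) PySem.Dict.empty := by
        rw [PySem.List.map_snd_enumerate]
    _ = (PySem.List.enumerate l).foldl (fun (d : PySem.Dict String String) p =>
        if ((l.foldl (fun (d : PySem.Dict String Int) f => d.insert (S f) (d.getD (S f) 0 + 1)) PySem.Dict.empty).getD (S p.2) 0) > 1
        then d.insert (K p.2) (R p.2) else d.insert (K p.2) (S p.2)) PySem.Dict.empty := by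
        rw [List.foldl_map]
    _ = _ := PySem.List.foldl_congr_mem _ _ _ _ (fun d p hp => hstep d p hp)

-- ===== VERDICT (by name: the statement is the Claim_ definition above) =====
theorem build_unique_headers_spec : Claim_equal_build_unique_headers := by
  intro l _ _
  unfold Spec_build_unique_headers build_unique_headers build_unique_headers_alt
  dsimp only []
  rw [PySem.List.foldl_prod_mk
        (f := fun (d : PySem.Dict String String) f => d.insert ((PySem.Dict.mk f).getD "field_key" "") (build_short_header ((PySem.Dict.mk f).getD "name" "")))
        (g := fun (d : PySem.Dict String Int) f => d.insert (build_short_header ((PySem.Dict.mk f).getD "name" "")) (d.getD (build_short_header ((PySem.Dict.mk f).getD "name" "")) 0 + 1))]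
  congr 1
  exact main_generic (fun f => build_short_header ((PySem.Dict.mk f).getD "name" ""))
    (fun f => (PySem.Dict.mk f).getD "field_key" "")
    (fun f => PySem.Str.replace ((PySem.Dict.mk f).getD "name" "") " \u2192 " " / ") l
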